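-- pv_equiv track=rewrite | github.com/sonyak-ku/sparta_algorithm | week_5/07_samsung3_baekjoon_style.py | get_min_city_chicken_distance
-- ===== SOURCE A (Python) =====
-- from itertools import combinations as cb
--
-- def get_min_city_chicken_distance(m, city_map):
--     # 치킨집위치들, 집들의 위치들 을 알아야 합니다.
--     chicken_stores, houses = [], []  # (1,1) 부터 시작이라는데 별로 안중요할 것같음
--     min_chicken_distances = [] # 각 조합의 치킨거리들을 담는다
--
--     for r, city_row in enumerate(city_map):
--         for c, city in enumerate(city_row):
--             if city == 1:
--                 houses.append((r, c))
--             elif city == 2: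
--                 chicken_stores.append((r, c))   # 맵상에 집들과 치킨집들의 정보를 저장한다.
--
--
--     chicken_store_combination = cb(chicken_stores, m)
--     for combi in chicken_store_combination: # 가장 최종 치킨거리가 최소인 치킨집의 조합을 찾는 용도
--         chicken_distances = []
--         for house in houses:
--             house_distances = []
--             for chicken_store in combi:  # 조합의 치킨 집 하나씩 띄운다.
--                 d = abs(house[0] - chicken_store[0]) + abs(house[1] - chicken_store[1]) # 어떤 치킨집과의 거리를 구함
--                 house_distances.append(d)
--             chicken_distances.append(min(house_distances)) # 어떤 집의 치킨 거리를 담는다.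
--         min_chicken_distances.append(sum(chicken_distances)) # 해당 조합의 도시의 치킨 거리의 최솟값을 담는다.
--
--
--
--     return min(min_chicken_distances)
-- ===== SOURCE B (Python) =====
-- def get_min_city_chicken_distance(m, city_map):
--     houses = [(r, c) for r, row in enumerate(city_map) for c, v in enumerate(row) if v == 1]
--     stores = [(r, c) for r, row in enumerate(city_map) for c, v in enumerate(row) if v == 2]
--     n = len(stores)
--
--     # distance table: dist[h][s] = Manhattan distance from house h to store s
--     dist = [[abs(hr - sr) + abs(hc - sc) for sr, sc in stores] for hr, hc in houses]
--
--     def cost(chosen):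
--         return sum(min(row[s] for s in chosen) for row in dist)
--
--     def best(i, k, chosen, acc):
--         # running minimum over all ways of picking k more store indices from i..n-1
--         if k == 0:
--             t = cost(chosen)
--             return t if acc is None or t < acc else acc
--         if n - i < k:
--             return acc
--         acc = best(i + 1, k - 1, chosen + [i], acc)
--         return best(i + 1, k, chosen, acc)
--
--     return best(0, m, [], None)
-- ===== Notes on version B (the rewrite author's own statement) =====
-- stated objective: alternative
-- what changed: B precomputes a house-by-store Manhattan distance table once, then enumerates size-m subsets of store INDICES by a recursive include/exclude choose-k with length pruning, keeping a running minimum, instead of A's itertools.combinations over store coordinates with per-combination inline distance recomputation, intermediate lists and a trailing min().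
import Mathlib
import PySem

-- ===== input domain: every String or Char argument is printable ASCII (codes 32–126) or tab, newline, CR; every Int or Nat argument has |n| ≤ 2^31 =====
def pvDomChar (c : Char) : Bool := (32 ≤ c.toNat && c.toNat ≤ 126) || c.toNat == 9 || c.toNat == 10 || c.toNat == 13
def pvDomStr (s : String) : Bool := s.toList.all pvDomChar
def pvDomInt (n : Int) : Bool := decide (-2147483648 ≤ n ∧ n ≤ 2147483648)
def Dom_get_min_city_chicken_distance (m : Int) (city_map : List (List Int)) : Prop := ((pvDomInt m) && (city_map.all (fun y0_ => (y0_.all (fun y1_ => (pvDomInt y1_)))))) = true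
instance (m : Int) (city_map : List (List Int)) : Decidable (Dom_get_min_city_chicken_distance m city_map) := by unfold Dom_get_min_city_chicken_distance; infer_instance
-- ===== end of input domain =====

-- B replaces A's per-combination inline distance recomputation and trailing min() by a precomputed
-- house×store distance table plus a recursive choose-k over store indices with a running minimum
-- (objective: alternative decomposition, not claimed faster).

-- ===== PORT A =====
def get_min_city_chicken_distance (m : Int) (city_map : List (List Int)) : Int :=
  let sh := (PySem.List.enumerate city_map 0).foldl (fun (acc : List (Int × Int) × List (Int × Int)) rrow =>
      (PySem.List.enumerate rrow.2 0).foldl (fun acc2 cc =>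
        if cc.2 = 1 then (acc2.1, acc2.2 ++ [(rrow.1, cc.1)])
        else if cc.2 = 2 then (acc2.1 ++ [(rrow.1, cc.1)], acc2.2)
        else acc2) acc) ([], [])
  let chicken_stores := sh.1
  let houses := sh.2
  let combos := PySem.List.combinations chicken_stores m.toNat
  let min_chicken_distances := combos.foldl (fun mcd combi =>
      let chicken_distances := houses.foldl (fun cds house =>
          let house_distances := combi.foldl (fun hds cs =>
              hds ++ [|house.1 - cs.1| + |house.2 - cs.2|]) ([] : List Int)
          cds ++ [(PySem.List.min? house_distances (fun x => x)).getD 0]) ([] : List Int)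
      mcd ++ [chicken_distances.foldl (· + ·) 0]) ([] : List Int)
  (PySem.List.min? min_chicken_distances (fun x => x)).getD 0

-- ===== PORT B =====
def pvHousesB (city_map : List (List Int)) : List (Int × Int) :=
  (PySem.List.enumerate city_map 0).flatMap (fun rr =>
    ((PySem.List.enumerate rr.2 0).filter (fun cv => cv.2 == 1)).map (fun cv => (rr.1, cv.1)))

def pvStoresB (city_map : List (List Int)) : List (Int × Int) :=
  (PySem.List.enumerate city_map 0).flatMap (fun rr =>
    ((PySem.List.enumerate rr.2 0).filter (fun cv => cv.2 == 2)).map (fun cv => (rr.1, cv.1)))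

def pvDistB (houses stores : List (Int × Int)) : List (List Int) :=
  houses.map (fun h => stores.map (fun s => |h.1 - s.1| + |h.2 - s.2|))

def pvCostB (dist : List (List Int)) (chosen : List Nat) : Int :=
  (dist.map (fun row =>
    (PySem.List.min? (chosen.map (fun (s : Nat) => (PySem.List.pyGet? row (s : Int)).getD 0)) (fun x => x)).getD 0)).sum

def pvMergeB (acc : Option Int) (t : Int) : Option Int :=
  some (match acc with | none => t | some a => if t < a then t else a)

def pvBestB (dist : List (List Int)) (n : Nat) : Nat → Nat → List Nat → Option Int → Option Int
  | _, 0, chosen, acc => pvMergeB acc (pvCostB dist chosen)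
  | i, k + 1, chosen, acc =>
    if _h : n - i < k + 1 then acc
    else
      let acc1 := pvBestB dist n (i + 1) k (chosen ++ [i]) acc
      pvBestB dist n (i + 1) (k + 1) chosen acc1
  termination_by i _ _ _ => n - i
  decreasing_by all_goals omega

def get_min_city_chicken_distance_alt (m : Int) (city_map : List (List Int)) : Int :=
  let houses := pvHousesB city_map
  let stores := pvStoresB city_map
  let n := stores.length
  let dist := pvDistB houses stores
  (pvBestB dist n 0 m.toNat [] none).getD 0

-- ===== PRECONDITION & SPEC =====
-- Pre_ is exact: A raises ValueError when m < 0 (combinations), when m exceeds the number of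
-- stores (min of the empty combination list), or when m = 0 with at least one house (min of the
-- empty per-house distance list); on every other input A returns normally.
def Pre_get_min_city_chicken_distance (m : Int) (city_map : List (List Int)) : Prop :=
  0 ≤ m ∧ m ≤ (city_map.flatten.count 2 : Int) ∧ ((1 : Int) ∈ city_map.flatten → 1 ≤ m)
instance (m : Int) (city_map : List (List Int)) : Decidable (Pre_get_min_city_chicken_distance m city_map) := by unfold Pre_get_min_city_chicken_distance; infer_instance

def pvWitness_get_min_city_chicken_distance : Int × List (List Int) := (1, [[1, 2], [0, 2]])

def Spec_get_min_city_chicken_distance (m : Int) (city_map : List (List Int)) (out : Int) : Prop := out = get_min_city_chicken_distance_alt m city_map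
instance (m : Int) (city_map : List (List Int)) (out : Int) : Decidable (Spec_get_min_city_chicken_distance m city_map out) := by unfold Spec_get_min_city_chicken_distance; infer_instance

-- ===== CLAIM (what is proved, stated in full; the proofs are below) =====
def Claim_equal_get_min_city_chicken_distance : Prop := ∀ (m : Int) (city_map : List (List Int)), Dom_get_min_city_chicken_distance m city_map → Pre_get_min_city_chicken_distance m city_map → Spec_get_min_city_chicken_distance m city_map (get_min_city_chicken_distance m city_map)

-- ===== LEMMAS AND PROOFS =====

theorem pv_inner_collect (r : Int) (l : List (Int × Int)) (s h : List (Int × Int)) :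
    l.foldl (fun acc2 cc =>
        if cc.2 = 1 then (acc2.1, acc2.2 ++ [(r, cc.1)])
        else if cc.2 = 2 then (acc2.1 ++ [(r, cc.1)], acc2.2)
        else acc2) (s, h)
    = (s ++ (l.filter (fun cv => cv.2 == 2)).map (fun cv => (r, cv.1)),
       h ++ (l.filter (fun cv => cv.2 == 1)).map (fun cv => (r, cv.1))) := by
  induction l generalizing s h with
  | nil => simp
  | cons x t ih =>
    simp only [List.foldl_cons, List.filter_cons]
    by_cases h1 : x.2 = 1
    · simp [h1, ih]
    · by_cases h2 : x.2 = 2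
      · simp [h1, h2, ih]
      · simp [h1, h2, ih]

theorem pv_collect_eq (l : List (Int × List Int)) (s h : List (Int × Int)) :
    l.foldl (fun acc rrow =>
      (PySem.List.enumerate rrow.2 0).foldl (fun acc2 cc =>
        if cc.2 = 1 then (acc2.1, acc2.2 ++ [(rrow.1, cc.1)])
        else if cc.2 = 2 then (acc2.1 ++ [(rrow.1, cc.1)], acc2.2)
        else acc2) acc) (s, h)
    = (s ++ l.flatMap (fun rr => ((PySem.List.enumerate rr.2 0).filter (fun cv => cv.2 == 2)).map (fun cv => (rr.1, cv.1))),
       h ++ l.flatMap (fun rr => ((PySem.List.enumerate rr.2 0).filter (fun cv => cv.2 == 1)).map (fun cv => (rr.1, cv.1)))) := by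
  induction l generalizing s h with
  | nil => simp
  | cons x t ih =>
    simp only [List.foldl_cons, List.flatMap_cons]
    rw [pv_inner_collect, ih]
    simp

theorem pv_collect_eq' (cm : List (List Int)) :
    (PySem.List.enumerate cm 0).foldl (fun acc rrow =>
      (PySem.List.enumerate rrow.2 0).foldl (fun acc2 cc =>
        if cc.2 = 1 then (acc2.1, acc2.2 ++ [(rrow.1, cc.1)])
        else if cc.2 = 2 then (acc2.1 ++ [(rrow.1, cc.1)], acc2.2)
        else acc2) acc) (([], []) : List (Int × Int) × List (Int × Int))
    = (pvStoresB cm, pvHousesB cm) := by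
  rw [pv_collect_eq]
  simp [pvStoresB, pvHousesB]

theorem pv_list_eq_range_map {α : Type} (xs : List α) (d : α) :
    xs = (List.range xs.length).map (fun j => xs.getD j d) := by
  apply List.ext_getElem
  · simp
  · intro i h1 h2
    simp [List.getD_eq_getElem?_getD, List.getElem?_eq_getElem (by simpa using h2)]

theorem pv_count_filter_enumerate (a : Int) (l : List Int) (s : Int) :
    ((PySem.List.enumerate l s).filter (fun cv => cv.2 == a)).length = l.count a := by
  induction l generalizing s with
  | nil => simp [PySem.List.enumerate_nil]
  | cons x t ih =>
    rw [PySem.List.enumerate_cons, List.filter_cons]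
    by_cases hx : x = a
    · simp [hx, List.count_cons, ih]
    · simp [hx, List.count_cons, Ne.symm hx, ih]

theorem pv_stores_len_aux (l : List (List Int)) (s : Int) :
    ((PySem.List.enumerate l s).map (fun rr =>
      (((PySem.List.enumerate rr.2 0).filter (fun cv => cv.2 == 2)).map (fun cv => (rr.1, cv.1))).length)).sum
    = (l.map (List.count 2)).sum := by
  induction l generalizing s with
  | nil => simp [PySem.List.enumerate_nil]
  | cons x t ih =>
    rw [PySem.List.enumerate_cons]
    simp only [List.map_cons, List.sum_cons]
    rw [List.length_map, pv_count_filter_enumerate, ih]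

theorem pv_stores_length (cm : List (List Int)) :
    (pvStoresB cm).length = cm.flatten.count 2 := by
  unfold pvStoresB
  rw [List.count_flatten, List.length_flatMap, pv_stores_len_aux]

-- running minimum fold versus min()
theorem pv_merge_fold_some (l : List Int) (a : Int) :
    l.foldl pvMergeB (some a) = some (l.foldl min a) := by
  induction l generalizing a with
  | nil => rfl
  | cons x t ih =>
    simp only [List.foldl_cons]
    have : pvMergeB (some a) x = some (min a x) := by
      simp only [pvMergeB, min_def]
      split_ifs <;> simp_all <;> omega
    rw [this, ih]

theorem pv_merge_fold_min? (l : List Int) (hne : l ≠ []) :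
    l.foldl pvMergeB none = PySem.List.min? l (fun x => x) := by
  cases l with
  | nil => simp at hne
  | cons x t =>
    rw [PySem.List.min?_id_cons]
    simp only [List.foldl_cons]
    have : pvMergeB none x = some x := rfl
    rw [this, pv_merge_fold_some]

-- pvBestB is the running-minimum fold of pvCostB over combinations of index ranges
theorem pv_bestB_eq (dist : List (List Int)) (n : Nat) :
    ∀ (d k i : Nat) (chosen : List Nat) (acc : Option Int), d = n - i →
    pvBestB dist n i k chosen acc
      = (PySem.List.combinations (List.range' i (n - i)) k).foldl
          (fun a c => pvMergeB a (pvCostB dist (chosen ++ c))) acc := by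
  intro d
  induction d with
  | zero =>
    intro k i chosen acc hd
    cases k with
    | zero => simp [pvBestB, PySem.List.combinations_zero]
    | succ k' =>
      rw [pvBestB]
      have h0 : n - i = 0 := hd.symm
      have hnil := PySem.List.combinations_eq_nil_of_length_lt
        (xs := List.range' i (n - i)) (r := k' + 1) (by simp [h0])
      simp [h0, hnil]
  | succ d' ih =>
    intro k i chosen acc hd
    cases k with
    | zero => simp [pvBestB, PySem.List.combinations_zero]
    | succ k' =>
      rw [pvBestB]
      by_cases hlt : n - i < k' + 1
      · have hnil := PySem.List.combinations_eq_nil_of_length_lt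
          (xs := List.range' i (n - i)) (r := k' + 1) (by simp [hlt])
        simp [hlt, hnil]
      · simp only [hlt, dite_false]
        have hin : i < n := by omega
        have hrange : List.range' i (n - i) = i :: List.range' (i + 1) (n - (i + 1)) := by
          have : n - i = (n - (i + 1)) + 1 := by omega
          rw [this, List.range'_succ]
        rw [hrange, PySem.List.combinations_cons_succ, List.foldl_append, List.foldl_map]
        rw [ih k' (i + 1) (chosen ++ [i]) acc (by omega), ih (k' + 1) (i + 1) chosen _ (by omega)]
        congr 1
        apply PySem.List.foldl_congr_mem
        intro a c _
        simp

theorem pv_combos_ne_nil {α : Type} (xs : List α) (k : Nat) (hk : k ≤ xs.length) :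
    PySem.List.combinations xs k ≠ [] := by
  have hmem : xs.take k ∈ PySem.List.combinations xs k := by
    rw [PySem.List.mem_combinations_iff]
    exact ⟨List.take_sublist k xs, List.length_take_of_le hk⟩
  intro h
  rw [h] at hmem
  simp at hmem

-- cost of a combination of valid store indices equals A's inline cost of the picked stores
theorem pv_cost_bridge (houses stores : List (Int × Int)) (c : List Nat)
    (hc : ∀ j ∈ c, j < stores.length) :
    pvCostB (pvDistB houses stores) c
      = (houses.map (fun h =>
          (PySem.List.min? ((c.map (fun j => stores.getD j (0, 0))).map
            (fun cs => |h.1 - cs.1| + |h.2 - cs.2|)) (fun x => x)).getD 0)).foldl (· + ·) 0 := by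
  unfold pvCostB pvDistB
  rw [List.map_map, List.sum_eq_foldl]
  congr 1
  apply List.map_congr_left
  intro h _
  simp only [Function.comp]
  have harg : c.map (fun (s : Nat) => (PySem.List.pyGet? (stores.map (fun s2 => |h.1 - s2.1| + |h.2 - s2.2|)) (s : Int)).getD 0)
      = (c.map (fun j => stores.getD j (0, 0))).map (fun cs => |h.1 - cs.1| + |h.2 - cs.2|) := by
    rw [List.map_map]
    apply List.map_congr_left
    intro j hj
    have hlt := hc j hj
    simp only [Function.comp]
    rw [PySem.List.pyGet?_natCast]
    simp [List.getElem?_map, List.getElem?_eq_getElem hlt, List.getD_eq_getElem?_getD]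
  rw [harg]

-- A's three nested append-folds are maps
theorem pv_inner_fold (house : Int × Int) (combi : List (Int × Int)) :
    combi.foldl (fun hds cs => hds ++ [|house.1 - cs.1| + |house.2 - cs.2|]) ([] : List Int)
    = combi.map (fun cs => |house.1 - cs.1| + |house.2 - cs.2|) := by
  rw [PySem.List.foldl_append_singleton_eq_map]
  simp

theorem pv_houses_fold (houses : List (Int × Int)) (combi : List (Int × Int)) :
    houses.foldl (fun cds house =>
      cds ++ [(PySem.List.min? (combi.foldl (fun hds cs =>
        hds ++ [|house.1 - cs.1| + |house.2 - cs.2|]) ([] : List Int)) (fun x => x)).getD 0]) ([] : List Int)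
    = houses.map (fun house =>
        (PySem.List.min? (combi.map (fun cs => |house.1 - cs.1| + |house.2 - cs.2|)) (fun x => x)).getD 0) := by
  rw [PySem.List.foldl_congr_mem houses _
    (fun cds house => cds ++ [(PySem.List.min? (combi.map (fun cs => |house.1 - cs.1| + |house.2 - cs.2|)) (fun x => x)).getD 0]) []
    (by intro acc x _; rw [pv_inner_fold])]
  rw [PySem.List.foldl_append_singleton_eq_map]
  simp

theorem pv_combi_fold (houses : List (Int × Int)) (L : List (List (Int × Int))) (acc : List Int) :
    L.foldl (fun mcd combi =>
      let chicken_distances := houses.foldl (fun cds house =>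
          let house_distances := combi.foldl (fun hds cs =>
              hds ++ [|house.1 - cs.1| + |house.2 - cs.2|]) ([] : List Int)
          cds ++ [(PySem.List.min? house_distances (fun x => x)).getD 0]) ([] : List Int)
      mcd ++ [chicken_distances.foldl (· + ·) 0]) acc
    = acc ++ L.map (fun combi =>
        ((houses.map (fun house =>
          (PySem.List.min? (combi.map (fun cs => |house.1 - cs.1| + |house.2 - cs.2|)) (fun x => x)).getD 0)).foldl (· + ·) 0)) := by
  rw [PySem.List.foldl_congr_mem L _
    (fun mcd combi => mcd ++ [((houses.map (fun house =>
      (PySem.List.min? (combi.map (fun cs => |house.1 - cs.1| + |house.2 - cs.2|)) (fun x => x)).getD 0)).foldl (· + ·) 0)]) acc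
    (by intro acc2 combi _; simp only []; rw [pv_houses_fold])]
  rw [PySem.List.foldl_append_singleton_eq_map]

-- ===== VERDICT (by name: the statement is the Claim_ definition above) =====
theorem get_min_city_chicken_distance_spec : Claim_equal_get_min_city_chicken_distance := by
  intro m cm _hdom hpre
  obtain ⟨hm0, hmle, _hh⟩ := hpre
  unfold Spec_get_min_city_chicken_distance
  unfold get_min_city_chicken_distance get_min_city_chicken_distance_alt
  simp only []
  rw [pv_collect_eq']
  set stores := pvStoresB cm with hst
  set houses := pvHousesB cm with hho
  set n := stores.length with hn
  set k := m.toNat with hk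
  have hkn : k ≤ n := by
    rw [hk, hn, hst, pv_stores_length cm]
    omega
  rw [pv_combi_fold]
  -- rewrite A's combinations over stores as combinations over index ranges
  have hsr : stores = (List.range n).map (fun j => stores.getD j (0, 0)) := pv_list_eq_range_map stores (0, 0)
  have hcomb : PySem.List.combinations stores k
      = (PySem.List.combinations (List.range n) k).map (List.map (fun j => stores.getD j (0, 0))) := by
    conv_lhs => rw [hsr]
    exact PySem.List.combinations_map _ _ _
  rw [hcomb, List.map_map, List.nil_append]
  -- B side: unfold the recursion into the fold over the same combinations
  rw [pv_bestB_eq (pvDistB houses stores) n (n - 0) k 0 [] none rfl]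
  rw [Nat.sub_zero, ← List.range_eq_range']
  have hBfold : (PySem.List.combinations (List.range n) k).foldl
        (fun a c => pvMergeB a (pvCostB (pvDistB houses stores) ([] ++ c))) none
      = ((PySem.List.combinations (List.range n) k).map
          (fun c => pvCostB (pvDistB houses stores) c)).foldl pvMergeB none := by
    rw [List.foldl_map]
    apply PySem.List.foldl_congr_mem
    intro a c _
    simp
  rw [hBfold]
  -- identical per-combination values
  have hmapeq : (PySem.List.combinations (List.range n) k).map
        (fun c => pvCostB (pvDistB houses stores) c)
      = (PySem.List.combinations (List.range n) k).map
          ((fun combi => ((houses.map (fun house =>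
            (PySem.List.min? (combi.map (fun cs => |house.1 - cs.1| + |house.2 - cs.2|)) (fun x => x)).getD 0)).foldl (· + ·) 0))
            ∘ List.map (fun j => stores.getD j (0, 0))) := by
    apply List.map_congr_left
    intro c hcmem
    have hsub := (PySem.List.mem_combinations_iff _ _ _).1 hcmem
    have hvalid : ∀ j ∈ c, j < stores.length := by
      intro j hj
      have : j ∈ List.range n := hsub.1.mem hj
      simpa [hn] using List.mem_range.1 this
    rw [pv_cost_bridge houses stores c hvalid]
    rfl
  rw [hmapeq, ← List.map_map]
  -- both sides are now min / running-minimum of the same list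
  have hne : ((PySem.List.combinations (List.range n) k).map (List.map (fun j => stores.getD j (0, 0)))).map
      (fun combi => ((houses.map (fun house =>
        (PySem.List.min? (combi.map (fun cs => |house.1 - cs.1| + |house.2 - cs.2|)) (fun x => x)).getD 0)).foldl (· + ·) 0)) ≠ [] := by
    simp only [ne_eq, List.map_eq_nil_iff]
    exact pv_combos_ne_nil _ k (by simpa using hkn)
  rw [pv_merge_fold_min? _ hne]
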